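-- pv_equiv track=rewrite | github.com/mejbrikhalifa/sustainability-tracker-day4 | utils.py | normalize_activity_name
-- ===== SOURCE A (Python) =====
-- def normalize_activity_name(name: str) -> str:
--     """Normalize arbitrary activity labels to canonical factor keys.
--
--     Operations:
--     - Trim whitespace
--     - Lowercase
--     - Replace spaces, dashes, and slashes with underscores
--     - Remove parentheses
--     - Collapse multiple underscores
--
--     Examples:
--     - "Electricity (kWh)" -> "electricity_kwh"
--     - "Flight short/km"   -> "flight_short_km"
--     """
--     s = name.strip().lower()
--     # Remove parentheses
--     s = s.replace("(", "").replace(")", "")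
--     # Unify common separators to underscores
--     for ch in [" ", "-", "/", "\\"]:
--         s = s.replace(ch, "_")
--     # Collapse multiple underscores
--     while "__" in s:
--         s = s.replace("__", "_")
--     return s
-- ===== SOURCE B (Python) =====
-- def normalize_activity_name(name: str) -> str:
--     """Single-pass normalization: one scan over the stripped, lowercased
--     string, tracking only the last buffered character."""
--     s = name.strip().lower()
--     buf = []
--     for c in s:
--         if c in "()":
--             continue
--         if c in " -/\\_":
--             if buf and buf[-1] == "_":
--                 continue
--             buf.append("_")
--         else:
--             buf.append(c)
--     return "".join(buf)
-- ===== Notes on version B (the rewrite author's own statement) =====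
-- stated objective: alternative
-- what changed: Replaces A's six sequential replace passes plus the while-loop collapse of '__' with a single left-to-right scan that drops parentheses, maps separators and underscores to a single '_' using only the last buffered character as state, and emits all other characters verbatim.
import Mathlib
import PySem

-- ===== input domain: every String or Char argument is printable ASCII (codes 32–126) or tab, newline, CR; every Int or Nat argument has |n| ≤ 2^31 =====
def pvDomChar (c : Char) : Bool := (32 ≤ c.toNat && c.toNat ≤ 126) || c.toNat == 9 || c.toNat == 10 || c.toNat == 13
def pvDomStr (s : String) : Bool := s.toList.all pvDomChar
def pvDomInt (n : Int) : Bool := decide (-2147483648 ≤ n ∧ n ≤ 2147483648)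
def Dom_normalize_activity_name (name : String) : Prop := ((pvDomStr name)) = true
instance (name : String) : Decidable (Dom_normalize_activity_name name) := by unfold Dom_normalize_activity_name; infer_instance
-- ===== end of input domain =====

-- B replaces A's six sequential replace passes and the while-loop '__'-collapse by one
-- left-to-right scan keeping only the last buffered character as state (objective: alternative).

-- ===== PORT A =====
-- Termination helpers for A's `while "__" in s:` loop (pvReplaceUULt is cited in decreasing_by).

theorem pvGoNilUU (fuel : Nat) (acc : List Char) :
    PySem.Chars.replace.go ['_', '_'] ['_'] fuel [] acc = acc.reverse := by
  cases fuel <;> simp [PySem.Chars.replace.go]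

theorem pvGoStepUU (fuel : Nat) (t acc : List Char) :
    PySem.Chars.replace.go ['_', '_'] ['_'] (fuel + 1) ('_' :: '_' :: t) acc
      = PySem.Chars.replace.go ['_', '_'] ['_'] fuel t ('_' :: acc) := by
  simp [PySem.Chars.replace.go, List.isPrefixOf]

theorem pvGoStepNoUU (fuel : Nat) (t acc : List Char) (c : Char)
    (h : ¬ (['_', '_'].isPrefixOf (c :: t) = true)) :
    PySem.Chars.replace.go ['_', '_'] ['_'] (fuel + 1) (c :: t) acc
      = PySem.Chars.replace.go ['_', '_'] ['_'] fuel t (c :: acc) := by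
  rw [PySem.Chars.replace.go]; simp [h]

theorem pvGoLenLe (fuel : Nat) : ∀ (l acc : List Char),
    (PySem.Chars.replace.go ['_', '_'] ['_'] fuel l acc).length ≤ acc.length + l.length := by
  induction fuel with
  | zero => intro l acc; simp [PySem.Chars.replace.go]
  | succ fuel ih =>
    intro l acc
    match l with
    | [] => rw [pvGoNilUU]; simp
    | c :: t =>
      by_cases hp : ['_', '_'].isPrefixOf (c :: t) = true
      · match t, hp with
        | b :: t', hp =>
          obtain ⟨r, hr⟩ := List.isPrefixOf_iff_prefix.mp hp
          cases hr
          simp only [List.append_eq, List.nil_append] at *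
          rw [pvGoStepUU]
          have h2 := ih r ('_' :: acc)
          simp only [List.length_cons] at *
          omega
        | [], hp => simp [List.isPrefixOf] at hp
      · rw [pvGoStepNoUU fuel t acc c hp]
        have h2 := ih t (c :: acc)
        simp only [List.length_cons] at *
        omega

theorem pvGoLenLt (fuel : Nat) : ∀ (l acc : List Char), l.length ≤ fuel →
    (['_', '_'] <:+: l) →
    (PySem.Chars.replace.go ['_', '_'] ['_'] fuel l acc).length < acc.length + l.length := by
  induction fuel with
  | zero =>
    intro l acc hlen hinf
    have : l = [] := by cases l <;> simp_all
    subst this; simp at hinf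
  | succ fuel ih =>
    intro l acc hlen hinf
    match l with
    | [] => simp at hinf
    | c :: t =>
      by_cases hp : ['_', '_'].isPrefixOf (c :: t) = true
      · match t, hp with
        | b :: t', hp =>
          obtain ⟨r, hr⟩ := List.isPrefixOf_iff_prefix.mp hp
          cases hr
          simp only [List.append_eq, List.nil_append] at *
          rw [pvGoStepUU]
          have h2 := pvGoLenLe fuel r ('_' :: acc)
          simp only [List.length_cons] at *
          omega
        | [], hp => simp [List.isPrefixOf] at hp
      · rw [pvGoStepNoUU fuel t acc c hp]
        have hinf' : ['_', '_'] <:+: t := by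
          rcases List.infix_cons_iff.mp hinf with hpre | h
          · exact absurd (List.isPrefixOf_iff_prefix.mpr hpre) hp
          · exact h
        have h2 := ih t (c :: acc) (by simp only [List.length_cons] at hlen; omega) hinf'
        simp only [List.length_cons] at *
        omega

theorem pvReplaceUULt (l : List Char) (h : ['_', '_'] <:+: l) :
    (PySem.Chars.replace l ['_', '_'] ['_']).length < l.length := by
  have := pvGoLenLt l.length l [] le_rfl h
  simpa [PySem.Chars.replace] using this

-- A's `while "__" in s: s = s.replace("__", "_")`
def pvCollapse (s : String) : String :=
  if h : PySem.Str.isIn "__" s = true then pvCollapse (PySem.Str.replace s "__" "_") else s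
termination_by s.toList.length
decreasing_by
  rw [PySem.Str.toList_replace]
  exact pvReplaceUULt _ (by
    have := (PySem.Str.isIn_iff_infix "__" s).mp h
    simpa using this)

def normalize_activity_name (name : String) : String :=
  let s0 := PySem.Str.lower (PySem.Str.strip name)
  let s1 := PySem.Str.replace (PySem.Str.replace s0 "(" "") ")" ""
  let s2 := [" ", "-", "/", "\\"].foldl (fun t ch => PySem.Str.replace t ch "_") s1
  pvCollapse s2

-- ===== PORT B =====
-- B's loop body: skip '(' and ')'; separators and '_' append one '_' unless the last
-- buffered char is already '_'; every other character is appended verbatim.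
def pvStep (buf : List Char) (c : Char) : List Char :=
  if c = '(' ∨ c = ')' then buf
  else if c = ' ' ∨ c = '-' ∨ c = '/' ∨ c = '\\' ∨ c = '_' then
    if buf.getLast? = some '_' then buf else buf ++ ['_']
  else buf ++ [c]

def normalize_activity_name_alt (name : String) : String :=
  let s := PySem.Str.lower (PySem.Str.strip name)
  String.ofList (s.toList.foldl pvStep [])

-- ===== PRECONDITION & SPEC =====
def Spec_normalize_activity_name (name : String) (out : String) : Prop := out = normalize_activity_name_alt name
instance (name : String) (out : String) : Decidable (Spec_normalize_activity_name name out) := by unfold Spec_normalize_activity_name; infer_instance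

-- ===== CLAIM (what is proved, stated in full; the proofs are below) =====
def Claim_equal_normalize_activity_name : Prop := ∀ (name : String), Dom_normalize_activity_name name → Spec_normalize_activity_name name (normalize_activity_name name)

-- ===== LEMMAS AND PROOFS =====

-- one-pass squeeze of '_'-runs; the Bool says "the last emitted char was '_'"
def pvSq : List Char → Bool → List Char
  | [], _ => []
  | c :: t, u =>
    if c = '_' then (if u then pvSq t true else '_' :: pvSq t true) else c :: pvSq t false

-- one global pass of  s.replace("__", "_")
def pvRp : List Char → List Char
  | [] => []
  | [c] => [c]
  | a :: b :: t => if a = '_' ∧ b = '_' then '_' :: pvRp t else a :: pvRp (b :: t)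

-- the four separator replacements, fused
def pvToU (c : Char) : Char :=
  if c = ' ' ∨ c = '-' ∨ c = '/' ∨ c = '\\' then '_' else c

-- replace(l, "__", "_") is the structural one-pass pvRp
theorem pvGoRp (fuel : Nat) : ∀ (l acc : List Char), l.length ≤ fuel →
    PySem.Chars.replace.go ['_', '_'] ['_'] fuel l acc = acc.reverse ++ pvRp l := by
  induction fuel with
  | zero =>
    intro l acc hlen
    have : l = [] := by cases l <;> simp_all
    subst this; rw [pvGoNilUU]; simp [pvRp]
  | succ fuel ih =>
    intro l acc hlen
    match l with
    | [] => rw [pvGoNilUU]; simp [pvRp]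
    | c :: t =>
      by_cases hp : ['_', '_'].isPrefixOf (c :: t) = true
      · match t, hp with
        | b :: t', hp =>
          obtain ⟨r, hr⟩ := List.isPrefixOf_iff_prefix.mp hp
          cases hr
          simp only [List.append_eq, List.nil_append] at *
          rw [pvGoStepUU]
          rw [ih r ('_' :: acc) (by simp only [List.length_cons] at hlen; omega)]
          rw [pvRp, if_pos ⟨rfl, rfl⟩]
          simp
        | [], hp => simp [List.isPrefixOf] at hp
      · rw [pvGoStepNoUU fuel t acc c hp]
        rw [ih t (c :: acc) (by simp only [List.length_cons] at hlen; omega)]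
        have hrp : pvRp (c :: t) = c :: pvRp t := by
          match t with
          | [] => rfl
          | b :: t' =>
            rw [pvRp, if_neg]
            rintro ⟨h1, h2⟩
            subst h1; subst h2
            simp [List.isPrefixOf] at hp
        rw [hrp]; simp

theorem pvReplaceRp (l : List Char) :
    PySem.Chars.replace l ['_', '_'] ['_'] = pvRp l := by
  have := pvGoRp l.length l [] le_rfl
  simpa [PySem.Chars.replace] using this

-- squeezing is invariant under one replace pass
theorem pvSqRp (l : List Char) : ∀ u, pvSq (pvRp l) u = pvSq l u := by
  induction l using pvRp.induct with
  | case1 => intro u; rfl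
  | case2 c => intro u; rfl
  | case3 a b t h ih =>
    obtain ⟨h1, h2⟩ := h; subst h1; subst h2
    intro u
    rw [pvRp, if_pos ⟨rfl, rfl⟩]
    cases u <;> simp [pvSq, ih]
  | case4 a b t h ih =>
    intro u
    rw [pvRp, if_neg h]
    by_cases ha : a = '_'
    · subst ha
      have hb : ¬ b = '_' := fun hb => h ⟨rfl, hb⟩
      cases u <;> simp [pvSq, ih, hb]
    · cases u <;> simp [pvSq, ha, ih]

-- a '__'-free list is a fixpoint of the squeeze
theorem pvSqId : ∀ (l : List Char), ¬ (['_', '_'] <:+: l) →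
    pvSq l false = l ∧ (l.head? ≠ some '_' → pvSq l true = l) := by
  intro l
  induction l with
  | nil => intro _; exact ⟨rfl, fun _ => rfl⟩
  | cons c t ih =>
    intro h
    have ht : ¬ (['_', '_'] <:+: t) := fun h' => h (List.infix_cons h')
    obtain ⟨ih1, ih2⟩ := ih ht
    constructor
    · by_cases hc : c = '_'
      · subst hc
        have hhd : t.head? ≠ some '_' := by
          intro hhd
          cases t with
          | nil => simp at hhd
          | cons d t' =>
            simp at hhd
            subst hhd
            exact h (List.IsPrefix.isInfix ⟨t', rfl⟩)
        simp [pvSq, ih2 hhd]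
      · simp [pvSq, hc, ih1]
    · intro hhd
      have hc : ¬ c = '_' := by simpa using hhd
      simp [pvSq, hc, ih1]

-- A's collapse loop computes the squeeze
theorem pvCollapseToList (s : String) : (pvCollapse s).toList = pvSq s.toList false := by
  induction s using pvCollapse.induct with
  | case1 s h ih =>
    rw [pvCollapse, dif_pos h, ih, PySem.Str.toList_replace]
    have h1 : ("__" : String).toList = ['_', '_'] := rfl
    have h2 : ("_" : String).toList = ['_'] := rfl
    rw [h1, h2, pvReplaceRp, pvSqRp]
  | case2 s h =>
    rw [pvCollapse, dif_neg h]
    have hni : ¬ (['_', '_'] <:+: s.toList) := by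
      intro hinf
      exact h ((PySem.Str.isIn_iff_infix "__" s).mpr (by simpa using hinf))
    exact ((pvSqId s.toList hni).1).symm

-- step lemmas for single-character replace
theorem pvGoNil1 (c : Char) (new : List Char) (fuel : Nat) (acc : List Char) :
    PySem.Chars.replace.go [c] new fuel [] acc = acc.reverse := by
  cases fuel <;> simp [PySem.Chars.replace.go]

theorem pvGoStepHit (c : Char) (new : List Char) (fuel : Nat) (t acc : List Char) :
    PySem.Chars.replace.go [c] new (fuel + 1) (c :: t) acc
      = PySem.Chars.replace.go [c] new fuel t (new.reverse ++ acc) := by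
  simp [PySem.Chars.replace.go, List.isPrefixOf]

theorem pvGoStepMiss (c : Char) (new : List Char) (fuel : Nat) (t acc : List Char) (d : Char)
    (h : ¬ d = c) :
    PySem.Chars.replace.go [c] new (fuel + 1) (d :: t) acc
      = PySem.Chars.replace.go [c] new fuel t (d :: acc) := by
  rw [PySem.Chars.replace.go, if_neg]
  simp [List.isPrefixOf]
  intro hcd; exact h hcd.symm

-- replace(l, [c], []) is a filter
theorem pvGoDel (c : Char) (fuel : Nat) : ∀ (l acc : List Char), l.length ≤ fuel →
    PySem.Chars.replace.go [c] [] fuel l acc = acc.reverse ++ l.filter (fun x => x != c) := by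
  induction fuel with
  | zero =>
    intro l acc hlen
    have : l = [] := by cases l <;> simp_all
    subst this; rw [pvGoNil1]; simp
  | succ fuel ih =>
    intro l acc hlen
    match l with
    | [] => rw [pvGoNil1]; simp
    | d :: t =>
      by_cases hd : d = c
      · subst hd
        rw [pvGoStepHit]
        simp only [List.reverse_nil, List.nil_append]
        rw [ih t acc (by simp only [List.length_cons] at hlen; omega)]
        simp
      · rw [pvGoStepMiss c [] fuel t acc d hd,
          ih t (d :: acc) (by simp only [List.length_cons] at hlen; omega)]
        simp [hd]

theorem pvReplaceDel (l : List Char) (c : Char) :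
    PySem.Chars.replace l [c] [] = l.filter (fun x => x != c) := by
  have := pvGoDel c l.length l [] le_rfl
  simpa [PySem.Chars.replace] using this

-- replace(l, [c], [e]) is a map
theorem pvGoMap (c e : Char) (fuel : Nat) : ∀ (l acc : List Char), l.length ≤ fuel →
    PySem.Chars.replace.go [c] [e] fuel l acc
      = acc.reverse ++ l.map (fun x => if x = c then e else x) := by
  induction fuel with
  | zero =>
    intro l acc hlen
    have : l = [] := by cases l <;> simp_all
    subst this; rw [pvGoNil1]; simp
  | succ fuel ih =>
    intro l acc hlen
    match l with
    | [] => rw [pvGoNil1]; simp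
    | d :: t =>
      by_cases hd : d = c
      · subst hd
        rw [pvGoStepHit, ih t (List.reverse [e] ++ acc) (by simp only [List.length_cons] at hlen; omega)]
        simp
      · rw [pvGoStepMiss c [e] fuel t acc d hd,
          ih t (d :: acc) (by simp only [List.length_cons] at hlen; omega)]
        simp [hd]

theorem pvReplaceMap (l : List Char) (c e : Char) :
    PySem.Chars.replace l [c] [e] = l.map (fun x => if x = c then e else x) := by
  have := pvGoMap c e l.length l [] le_rfl
  simpa [PySem.Chars.replace] using this

-- the four separator maps fuse into pvToU
theorem pvMapComp (l : List Char) :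
    ((((l.map (fun x => if x = ' ' then '_' else x)).map
        (fun x => if x = '-' then '_' else x)).map
        (fun x => if x = '/' then '_' else x)).map
        (fun x => if x = '\\' then '_' else x)) = l.map pvToU := by
  induction l with
  | nil => rfl
  | cons c t ih =>
    simp only [List.map_cons] at ih ⊢
    rw [ih]
    congr 1
    by_cases h1 : c = ' ' <;> by_cases h2 : c = '-' <;> by_cases h3 : c = '/' <;>
      by_cases h4 : c = '\\' <;> simp_all [pvToU]

-- B's fold is the squeeze of the filtered, separator-mapped list
theorem pvFoldEq (cs : List Char) : ∀ (buf : List Char),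
    cs.foldl pvStep buf
      = buf ++ pvSq (((cs.filter (fun x => x != '(')).filter (fun x => x != ')')).map pvToU)
          (decide (buf.getLast? = some '_')) := by
  induction cs with
  | nil => intro buf; simp [pvSq]
  | cons c t ih =>
    intro buf
    rw [List.foldl_cons]
    by_cases hp : c = '(' ∨ c = ')'
    · have hstep : pvStep buf c = buf := by rw [pvStep, if_pos hp]
      rw [hstep, ih buf]
      rcases hp with h | h <;> subst h <;> simp
    · have hkeep1 : (c != '(') = true := by simp; intro h; exact hp (Or.inl h)
      have hkeep2 : (c != ')') = true := by simp; intro h; exact hp (Or.inr h)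
      by_cases hs : c = ' ' ∨ c = '-' ∨ c = '/' ∨ c = '\\' ∨ c = '_'
      · have hto : pvToU c = '_' := by
          rcases hs with h | h | h | h | h <;> subst h <;> simp [pvToU]
        by_cases hl : buf.getLast? = some '_'
        · have hstep : pvStep buf c = buf := by
            rw [pvStep, if_neg hp, if_pos hs, if_pos hl]
          rw [hstep, ih buf]
          simp [hkeep1, hkeep2, hto, pvSq, hl]
        · have hstep : pvStep buf c = buf ++ ['_'] := by
            rw [pvStep, if_neg hp, if_pos hs, if_neg hl]
          rw [hstep, ih (buf ++ ['_'])]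
          simp [hkeep1, hkeep2, hto, pvSq, hl]
      · have hc : ¬ c = '_' := fun h => hs (by simp [h])
        have hto : pvToU c = c := by
          rw [pvToU, if_neg]
          intro h
          exact hs (by tauto)
        have hstep : pvStep buf c = buf ++ [c] := by
          rw [pvStep, if_neg hp, if_neg hs]
        rw [hstep, ih (buf ++ [c])]
        simp [hkeep1, hkeep2, hto, pvSq, hc]

-- ===== VERDICT (by name: the statement is the Claim_ definition above) =====
theorem normalize_activity_name_spec : Claim_equal_normalize_activity_name := by
  intro name _
  unfold Spec_normalize_activity_name normalize_activity_name normalize_activity_name_alt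
  apply String.toList_injective
  rw [String.toList_ofList]
  simp only [List.foldl_cons, List.foldl_nil]
  rw [pvCollapseToList, pvFoldEq]
  simp only [PySem.Str.toList_replace]
  have hL : ("(" : String).toList = ['('] := rfl
  have hR : (")" : String).toList = [')'] := rfl
  have hE : ("" : String).toList = ([] : List Char) := rfl
  have hSp : (" " : String).toList = [' '] := rfl
  have hDa : ("-" : String).toList = ['-'] := rfl
  have hSl : ("/" : String).toList = ['/'] := rfl
  have hBs : ("\\" : String).toList = ['\\'] := rfl
  have hU : ("_" : String).toList = ['_'] := rfl
  rw [hL, hR, hE, hSp, hDa, hSl, hBs, hU]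
  rw [pvReplaceDel, pvReplaceDel, pvReplaceMap, pvReplaceMap, pvReplaceMap, pvReplaceMap,
    pvMapComp]
  simp
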